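-- pv_equiv track=rewrite | github.com/Sh3mm/truth-tables | possibility gen.py | groupsofKarnaugh
-- ===== SOURCE A (Python) =====
-- def groupsofKarnaugh(karnaughTable, start, end):
--     hight = abs(end[0] - start[0]) + 1
--     lenght = abs(end[1] - start[1]) + 1
--
--     if areX("H", hight, karnaughTable, start, end, 1):
--         end[0] += hight
--         groupsofKarnaugh(karnaughTable, start, end)
--
--     elif areX("L", lenght, karnaughTable, start, end, 1):
--         end[1] += lenght
--         groupsofKarnaugh(karnaughTable, start, end)
--
-- #    if areX("-H", -hight, karnaughTable, start, end, 1):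
-- #        start[0] -= hight
-- #        groupsofKarnaugh(karnaughTable, start, end)
--
--     elif areX("-L", -lenght, karnaughTable, start, end, 1):
--         start[1] -= lenght
--         groupsofKarnaugh(karnaughTable, start, end)
--
--     return [start, end]
--
-- def areX(side,lenght, karnaughTable, start, end, x):
--     if side == "L":
--         possibleEnd = [end[0],end[1]+lenght]
--         possibleStart = start[:]
--     if side == "H":
--         possibleEnd = [end[0] + lenght, end[1]]
--         possibleStart = start[:]
--     if side == "-L":
--         possibleStart = [start[0] , start[1]+ lenght]
--         possibleEnd = end[:]
--     if side == "-H":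
--         possibleStart = [start[0] + lenght, start[1]]
--         possibleEnd = end[:]
--
--     try:
--         if possibleStart[0] > possibleEnd [0]:
--             smallestHight = possibleEnd[0]
--             bigestHight = possibleStart[0]
--         else:
--             smallestHight = possibleStart[0]
--             bigestHight = possibleEnd[0]
--         if possibleStart[1] > possibleEnd [1]:
--             smallestLenght = possibleEnd[1]
--             bigestLenght = possibleStart[1]
--         else:
--             smallestLenght = possibleStart[1]
--             bigestLenght = possibleEnd[1]
--
--         for i in range(smallestHight, bigestHight+1):
--             for j in range(smallestLenght, bigestLenght+1):
--                 if karnaughTable[i][j] != x: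
--                     return False
--     except IndexError:
--         return False
--     return True
-- ===== SOURCE B (Python) =====
-- def groupsofKarnaugh(karnaughTable, start, end):
--     # Iterative growth loop: try to double the rectangle downward, rightward,
--     # then leftward, until no direction works, and return the two corners.
--     while True:
--         hight = abs(end[0] - start[0]) + 1
--         lenght = abs(end[1] - start[1]) + 1
--         if _all_ones(karnaughTable, start[0], end[0] + hight, start[1], end[1]):
--             end[0] += hight
--         elif _all_ones(karnaughTable, start[0], end[0], start[1], end[1] + lenght):
--             end[1] += lenght
--         elif _all_ones(karnaughTable, start[0], end[0], start[1] - lenght, end[1]):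
--             start[1] -= lenght
--         else:
--             return [start, end]
--
-- def _all_ones(table, a0, b0, a1, b1):
--     # Is every cell of the rectangle spanned by the two (unordered) corners a 1?
--     # A rectangle sticking out of the table does not qualify.
--     lo0, hi0 = min(a0, b0), max(a0, b0)
--     lo1, hi1 = min(a1, b1), max(a1, b1)
--     try:
--         return all(table[i][j] == 1
--                    for i in range(lo0, hi0 + 1)
--                    for j in range(lo1, hi1 + 1))
--     except IndexError:
--         return False
-- ===== Notes on version B (the rewrite author's own statement) =====
-- stated objective: idiomatic
-- what changed: Replaced A's tail recursion and its string-dispatched four-branch areX probe with an iterative while-loop calling one direct rectangle predicate that normalises the corners with min/max and scans the cells with a single all(...) generator over the product of the two ranges; Pre_ excludes only start/end shorter than two elements, where A raises IndexError.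
import Mathlib
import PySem

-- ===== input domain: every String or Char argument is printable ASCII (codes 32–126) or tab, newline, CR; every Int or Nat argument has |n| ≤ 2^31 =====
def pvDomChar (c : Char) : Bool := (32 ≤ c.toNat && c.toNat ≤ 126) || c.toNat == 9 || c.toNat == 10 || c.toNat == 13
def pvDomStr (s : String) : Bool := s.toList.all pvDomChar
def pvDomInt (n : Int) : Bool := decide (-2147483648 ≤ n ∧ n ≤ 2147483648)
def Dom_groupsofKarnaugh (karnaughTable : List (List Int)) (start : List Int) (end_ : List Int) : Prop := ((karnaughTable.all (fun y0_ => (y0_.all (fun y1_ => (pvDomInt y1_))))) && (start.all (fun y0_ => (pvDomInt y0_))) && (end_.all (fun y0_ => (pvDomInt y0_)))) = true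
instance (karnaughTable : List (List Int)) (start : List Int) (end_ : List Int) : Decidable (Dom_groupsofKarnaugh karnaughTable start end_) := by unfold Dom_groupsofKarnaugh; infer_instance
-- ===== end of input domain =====

-- B replaces A's tail recursion and its string-dispatched four-branch areX probe by an
-- iterative while-loop with one direct rectangle predicate (objective: idiomatic).
-- In Python both A and B mutate start/end in place; the equivalence proved here is about
-- the RETURN value.

-- ===== PORT A =====
-- The two nested `for … in range(…)` loops of areX, as count-driven recursions (a Python
-- for over range(lo, hi+1) runs exactly (hi+1-lo).toNat iterations and stops at the first
-- `return False`); karnaughTable[i][j] is read through pyGet?, whose none is exactly the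
-- caught IndexError.
def areXInner (karnaughTable : List (List Int)) (i x : Int) : Nat → Int → Bool
  | 0, _ => true
  | fuel + 1, j =>
    match PySem.List.pyGet? karnaughTable i with
    | none => false          -- IndexError caught: return False
    | some row =>
      match PySem.List.pyGet? row j with
      | none => false        -- IndexError caught: return False
      | some v => if v == x then areXInner karnaughTable i x fuel (j + 1) else false

def areXOuter (karnaughTable : List (List Int)) (x lo1 hi1 : Int) : Nat → Int → Bool
  | 0, _ => true
  | fuel + 1, i =>
    if areXInner karnaughTable i x (hi1 + 1 - lo1).toNat lo1 then
      areXOuter karnaughTable x lo1 hi1 fuel (i + 1)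
    else false

-- areX: possibleStart/possibleEnd are values of which only indices 0 and 1 are ever read,
-- so they are kept as pairs.
def areX (side : String) (lenght : Int) (karnaughTable : List (List Int)) (start : List Int) (end_ : List Int) (x : Int) : Bool :=
  let s0 := PySem.List.pyGetD start 0 0   -- in range whenever Python A does not raise (Pre_)
  let s1 := PySem.List.pyGetD start 1 0
  let e0 := PySem.List.pyGetD end_ 0 0
  let e1 := PySem.List.pyGetD end_ 1 0
  let ps : Int × Int :=
    if side = "L" then (s0, s1)
    else if side = "H" then (s0, s1)
    else if side = "-L" then (s0, s1 + lenght)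
    else (s0 + lenght, s1)
  let pe : Int × Int :=
    if side = "L" then (e0, e1 + lenght)
    else if side = "H" then (e0 + lenght, e1)
    else (e0, e1)
  let smallestHight := if ps.1 > pe.1 then pe.1 else ps.1
  let bigestHight := if ps.1 > pe.1 then ps.1 else pe.1
  let smallestLenght := if ps.2 > pe.2 then pe.2 else ps.2
  let bigestLenght := if ps.2 > pe.2 then ps.2 else pe.2
  areXOuter karnaughTable x smallestLenght bigestLenght ((bigestHight + 1 - smallestHight).toNat) smallestHight

-- A's recursion, fuel-indexed.  The fuel strictly exceeds the Python recursion depth on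
-- every input: a firing branch at least doubles a span that a successful areX forces into
-- the valid Python index window (whose size is at most twice a list length), so the number
-- of recursive calls is logarithmic in the table dimensions while the fuel is linear.
def groupsofKarnaughGo : Nat → List (List Int) → List Int → List Int → List (List Int)
  | 0, _, start, end_ => [start, end_]   -- never reached
  | fuel + 1, karnaughTable, start, end_ =>
    let hight := |PySem.List.pyGetD end_ 0 0 - PySem.List.pyGetD start 0 0| + 1
    let lenght := |PySem.List.pyGetD end_ 1 0 - PySem.List.pyGetD start 1 0| + 1
    if areX "H" hight karnaughTable start end_ 1 then
      groupsofKarnaughGo fuel karnaughTable start (end_.set 0 (PySem.List.pyGetD end_ 0 0 + hight))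
    else if areX "L" lenght karnaughTable start end_ 1 then
      groupsofKarnaughGo fuel karnaughTable start (end_.set 1 (PySem.List.pyGetD end_ 1 0 + lenght))
    else if areX "-L" (-lenght) karnaughTable start end_ 1 then
      groupsofKarnaughGo fuel karnaughTable (start.set 1 (PySem.List.pyGetD start 1 0 - lenght)) end_
    else [start, end_]

def groupsofKarnaugh (karnaughTable : List (List Int)) (start : List Int) (end_ : List Int) : List (List Int) :=
  groupsofKarnaughGo (karnaughTable.length + (karnaughTable.map List.length).sum + 64) karnaughTable start end_

-- ===== PORT B =====
-- B's rectangle predicate: normalise the two corners with min/max, then the single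
-- `all(table[i][j] == 1 for i in … for j in …)` generator over the product of the two
-- ranges.  Python's generator is lazy and short-circuits, so it is ported as two
-- count-driven && recursions (the j-counter nested in the i-counter, exactly the two
-- `for` clauses of the generator); a lookup outside the table is the caught IndexError,
-- pyGet? = none, making the predicate false.
def allOnesJ (table : List (List Int)) (i : Int) : Nat → Int → Bool
  | 0, _ => true
  | fuel + 1, j =>
    (match (PySem.List.pyGet? table i).bind fun row => PySem.List.pyGet? row j with
     | none => false
     | some v => v == 1) && allOnesJ table i fuel (j + 1)

def allOnesI (table : List (List Int)) (lo1 : Int) (nj : Nat) : Nat → Int → Bool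
  | 0, _ => true
  | fuel + 1, i => allOnesJ table i nj lo1 && allOnesI table lo1 nj fuel (i + 1)

def allOnes (table : List (List Int)) (a0 b0 a1 b1 : Int) : Bool :=
  let lo0 := min a0 b0
  let hi0 := max a0 b0
  let lo1 := min a1 b1
  let hi1 := max a1 b1
  allOnesI table lo1 ((hi1 + 1 - lo1).toNat) ((hi0 + 1 - lo0).toNat) lo0

-- B's `while True` loop, fuel-indexed with the same depth bound as A's recursion.
def groupsofKarnaughLoop : Nat → List (List Int) → List Int → List Int → List (List Int)
  | 0, _, start, end_ => [start, end_]   -- never reached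
  | fuel + 1, karnaughTable, start, end_ =>
    let s0 := PySem.List.pyGetD start 0 0
    let s1 := PySem.List.pyGetD start 1 0
    let e0 := PySem.List.pyGetD end_ 0 0
    let e1 := PySem.List.pyGetD end_ 1 0
    let hight := |e0 - s0| + 1
    let lenght := |e1 - s1| + 1
    if allOnes karnaughTable s0 (e0 + hight) s1 e1 then
      groupsofKarnaughLoop fuel karnaughTable start (end_.set 0 (e0 + hight))
    else if allOnes karnaughTable s0 e0 s1 (e1 + lenght) then
      groupsofKarnaughLoop fuel karnaughTable start (end_.set 1 (e1 + lenght))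
    else if allOnes karnaughTable s0 e0 (s1 - lenght) e1 then
      groupsofKarnaughLoop fuel karnaughTable (start.set 1 (s1 - lenght)) end_
    else [start, end_]

def groupsofKarnaugh_alt (karnaughTable : List (List Int)) (start : List Int) (end_ : List Int) : List (List Int) :=
  groupsofKarnaughLoop (karnaughTable.length + (karnaughTable.map List.length).sum + 64) karnaughTable start end_

-- ===== PRECONDITION & SPEC =====
-- A raises an uncaught IndexError (at end[0] / start[1] / …, outside areX's try) exactly
-- when start or end has fewer than two elements; B raises on the same inputs.
def Pre_groupsofKarnaugh (karnaughTable : List (List Int)) (start : List Int) (end_ : List Int) : Prop :=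
  2 ≤ start.length ∧ 2 ≤ end_.length
instance (karnaughTable : List (List Int)) (start : List Int) (end_ : List Int) : Decidable (Pre_groupsofKarnaugh karnaughTable start end_) := by unfold Pre_groupsofKarnaugh; infer_instance
def pvWitness_groupsofKarnaugh : List (List Int) × List Int × List Int := ([[1, 0], [1, 1]], [0, 0], [0, 0])

def Spec_groupsofKarnaugh (karnaughTable : List (List Int)) (start : List Int) (end_ : List Int) (out : List (List Int)) : Prop := out = groupsofKarnaugh_alt karnaughTable start end_
instance (karnaughTable : List (List Int)) (start : List Int) (end_ : List Int) (out : List (List Int)) : Decidable (Spec_groupsofKarnaugh karnaughTable start end_ out) := by unfold Spec_groupsofKarnaugh; infer_instance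

-- ===== CLAIM (what is proved, stated in full; the proofs are below) =====
def Claim_equal_groupsofKarnaugh : Prop := ∀ (karnaughTable : List (List Int)) (start : List Int) (end_ : List Int), Dom_groupsofKarnaugh karnaughTable start end_ → Pre_groupsofKarnaugh karnaughTable start end_ → Spec_groupsofKarnaugh karnaughTable start end_ (groupsofKarnaugh karnaughTable start end_)

-- ===== LEMMAS AND PROOFS =====

-- A range written by its iteration count.
lemma pyRange_count (a b : Int) :
    PySem.List.pyRange a (a + (((b - a).toNat : Nat) : Int)) 1 = PySem.List.pyRange a b 1 := by
  have h : ((a + (((b - a).toNat : Nat) : Int)) - a).toNat = (b - a).toNat := by omega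
  rw [PySem.List.pyRange_one, PySem.List.pyRange_one, h]

-- The inner count-driven loop is the `.all` over its range.
lemma areXInner_eq (karnaughTable : List (List Int)) (i x : Int) : ∀ (fuel : Nat) (j : Int),
    areXInner karnaughTable i x fuel j
      = ((PySem.List.pyRange j (j + (fuel : Int)) 1).all fun j' =>
          match PySem.List.pyGet? karnaughTable i with
          | none => false
          | some row =>
            match PySem.List.pyGet? row j' with
            | none => false
            | some v => v == x) := by
  intro fuel
  induction fuel with
  | zero =>
    intro j
    simp [areXInner]
  | succ n ih =>
    intro j
    have hb : j + ((n + 1 : Nat) : Int) = (j + 1) + (n : Int) := by push_cast; ring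
    rw [hb, PySem.List.pyRange_one_cons (by omega : j < (j + 1) + (n : Int)), List.all_cons]
    simp only [areXInner]
    rw [← ih (j + 1)]
    cases hg : PySem.List.pyGet? karnaughTable i with
    | none => simp
    | some row =>
      cases hg2 : PySem.List.pyGet? row j with
      | none => simp [hg2]
      | some v => cases hv : (v == x) <;> simp [hg2, hv]

-- Python's `if cond: continue else return False` step of the outer loop, as &&.
lemma if_then_else_false_eq_and (b r : Bool) : (if b then r else false) = (b && r) := by
  cases b <;> simp

-- The outer count-driven loop is the nested `.all` over both ranges.
lemma areXOuter_eq (karnaughTable : List (List Int)) (x lo1 hi1 : Int) : ∀ (fuel : Nat) (i : Int),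
    areXOuter karnaughTable x lo1 hi1 fuel i
      = ((PySem.List.pyRange i (i + (fuel : Int)) 1).all fun i' =>
          (PySem.List.pyRange lo1 (hi1 + 1) 1).all fun j =>
            match PySem.List.pyGet? karnaughTable i' with
            | none => false
            | some row =>
              match PySem.List.pyGet? row j with
              | none => false
              | some v => v == x) := by
  intro fuel
  induction fuel with
  | zero =>
    intro i
    simp [areXOuter]
  | succ n ih =>
    intro i
    have hb : i + ((n + 1 : Nat) : Int) = (i + 1) + (n : Int) := by push_cast; ring
    rw [hb, PySem.List.pyRange_one_cons (by omega : i < (i + 1) + (n : Int)), List.all_cons]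
    simp only [areXOuter]
    rw [areXInner_eq, pyRange_count lo1 (hi1 + 1), ← ih (i + 1), if_then_else_false_eq_and]

-- A's whole scan, as the nested `.all` form.
lemma areX_scan_eq (karnaughTable : List (List Int)) (x lo0 hi0 lo1 hi1 : Int) :
    areXOuter karnaughTable x lo1 hi1 ((hi0 + 1 - lo0).toNat) lo0
      = ((PySem.List.pyRange lo0 (hi0 + 1) 1).all fun i =>
          (PySem.List.pyRange lo1 (hi1 + 1) 1).all fun j =>
            match PySem.List.pyGet? karnaughTable i with
            | none => false
            | some row =>
              match PySem.List.pyGet? row j with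
              | none => false
              | some v => v == x) := by
  rw [areXOuter_eq, pyRange_count lo0 (hi0 + 1)]

-- B's j-recursion is the `.all` over its range.
lemma allOnesJ_eq (table : List (List Int)) (i : Int) : ∀ (fuel : Nat) (j : Int),
    allOnesJ table i fuel j
      = ((PySem.List.pyRange j (j + (fuel : Int)) 1).all fun j' =>
          match PySem.List.pyGet? table i with
          | none => false
          | some row =>
            match PySem.List.pyGet? row j' with
            | none => false
            | some v => v == 1) := by
  intro fuel
  induction fuel with
  | zero =>
    intro j
    simp [allOnesJ]
  | succ n ih =>
    intro j
    have hb : j + ((n + 1 : Nat) : Int) = (j + 1) + (n : Int) := by push_cast; ring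
    rw [hb, PySem.List.pyRange_one_cons (by omega : j < (j + 1) + (n : Int)), List.all_cons]
    simp only [allOnesJ]
    rw [← ih (j + 1)]
    cases hg : PySem.List.pyGet? table i with
    | none => simp
    | some row => cases hg2 : PySem.List.pyGet? row j with
      | none => simp
      | some v => rfl

-- B's i-recursion is the nested `.all` over both ranges.
lemma allOnesI_eq (table : List (List Int)) (lo1 hi1 : Int) : ∀ (fuel : Nat) (i : Int),
    allOnesI table lo1 ((hi1 + 1 - lo1).toNat) fuel i
      = ((PySem.List.pyRange i (i + (fuel : Int)) 1).all fun i' =>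
          (PySem.List.pyRange lo1 (hi1 + 1) 1).all fun j =>
            match PySem.List.pyGet? table i' with
            | none => false
            | some row =>
              match PySem.List.pyGet? row j with
              | none => false
              | some v => v == 1) := by
  intro fuel
  induction fuel with
  | zero =>
    intro i
    simp [allOnesI]
  | succ n ih =>
    intro i
    have hb : i + ((n + 1 : Nat) : Int) = (i + 1) + (n : Int) := by push_cast; ring
    rw [hb, PySem.List.pyRange_one_cons (by omega : i < (i + 1) + (n : Int)), List.all_cons]
    simp only [allOnesI]
    rw [allOnesJ_eq, pyRange_count lo1 (hi1 + 1), ← ih (i + 1)]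

-- B's whole predicate, as the nested `.all` form.
lemma allOnes_eq_nested (table : List (List Int)) (a0 b0 a1 b1 : Int) :
    allOnes table a0 b0 a1 b1
      = ((PySem.List.pyRange (min a0 b0) (max a0 b0 + 1) 1).all fun i =>
          (PySem.List.pyRange (min a1 b1) (max a1 b1 + 1) 1).all fun j =>
            match PySem.List.pyGet? table i with
            | none => false
            | some row =>
              match PySem.List.pyGet? row j with
              | none => false
              | some v => v == (1 : Int)) := by
  unfold allOnes
  rw [allOnesI_eq, pyRange_count (min a0 b0) (max a0 b0 + 1)]

-- A's nested scan with its `if > then/else` corner selection equals B's min/max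
-- predicate.
lemma rect_eq (table : List (List Int)) (a0 b0 a1 b1 : Int) :
    ((PySem.List.pyRange (if a0 > b0 then b0 else a0) ((if a0 > b0 then a0 else b0) + 1) 1).all fun i =>
        (PySem.List.pyRange (if a1 > b1 then b1 else a1) ((if a1 > b1 then a1 else b1) + 1) 1).all fun j =>
          match PySem.List.pyGet? table i with
          | none => false
          | some row =>
            match PySem.List.pyGet? row j with
            | none => false
            | some v => v == (1 : Int))
      = allOnes table a0 b0 a1 b1 := by
  have m0 : (if a0 > b0 then b0 else a0) = min a0 b0 := by rw [Int.min_def]; split_ifs <;> omega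
  have M0 : (if a0 > b0 then a0 else b0) = max a0 b0 := by rw [Int.max_def]; split_ifs <;> omega
  have m1 : (if a1 > b1 then b1 else a1) = min a1 b1 := by rw [Int.min_def]; split_ifs <;> omega
  have M1 : (if a1 > b1 then a1 else b1) = max a1 b1 := by rw [Int.max_def]; split_ifs <;> omega
  rw [m0, M0, m1, M1, allOnes_eq_nested]

-- The three rectangle probes A makes, expressed through B's allOnes.
lemma areX_H_eq (lenght : Int) (t : List (List Int)) (s e : List Int) :
    areX "H" lenght t s e 1
      = allOnes t (PySem.List.pyGetD s 0 0) (PySem.List.pyGetD e 0 0 + lenght)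
          (PySem.List.pyGetD s 1 0) (PySem.List.pyGetD e 1 0) := by
  simp only [areX, if_neg (show ¬("H" : String) = "L" by decide)]
  rw [areX_scan_eq]
  exact rect_eq t _ _ _ _

lemma areX_L_eq (lenght : Int) (t : List (List Int)) (s e : List Int) :
    areX "L" lenght t s e 1
      = allOnes t (PySem.List.pyGetD s 0 0) (PySem.List.pyGetD e 0 0)
          (PySem.List.pyGetD s 1 0) (PySem.List.pyGetD e 1 0 + lenght) := by
  simp only [areX]
  rw [areX_scan_eq]
  exact rect_eq t _ _ _ _

lemma areX_negL_eq (lenght : Int) (t : List (List Int)) (s e : List Int) :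
    areX "-L" (-lenght) t s e 1
      = allOnes t (PySem.List.pyGetD s 0 0) (PySem.List.pyGetD e 0 0)
          (PySem.List.pyGetD s 1 0 - lenght) (PySem.List.pyGetD e 1 0) := by
  simp only [areX, if_neg (show ¬("-L" : String) = "L" by decide),
    if_neg (show ¬("-L" : String) = "H" by decide)]
  rw [areX_scan_eq]
  have := rect_eq t (PySem.List.pyGetD s 0 0) (PySem.List.pyGetD e 0 0)
    (PySem.List.pyGetD s 1 0 + -lenght) (PySem.List.pyGetD e 1 0)
  rw [show PySem.List.pyGetD s 1 0 + -lenght = PySem.List.pyGetD s 1 0 - lenght from by ring] at this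
  exact this

-- Step-by-step agreement of A's recursion and B's loop on equal fuel.
lemma go_eq_loop (fuel : Nat) : ∀ (t : List (List Int)) (s e : List Int),
    groupsofKarnaughGo fuel t s e = groupsofKarnaughLoop fuel t s e := by
  induction fuel with
  | zero => intro t s e; rfl
  | succ n ih =>
    intro t s e
    simp only [groupsofKarnaughGo, groupsofKarnaughLoop, areX_H_eq, areX_L_eq, areX_negL_eq]
    split_ifs <;> first | exact ih .. | rfl

-- ===== VERDICT (by name: the statement is the Claim_ definition above) =====
theorem groupsofKarnaugh_spec : Claim_equal_groupsofKarnaugh := by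
  intro karnaughTable start end_ _ _
  unfold Spec_groupsofKarnaugh groupsofKarnaugh groupsofKarnaugh_alt
  exact go_eq_loop _ karnaughTable start end_
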